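-- pv_equiv track=rewrite | github.com/AniruddhaPKawarase/agentic-doc-generator | utils/text_processor.py | _get_trade_keywords
-- ===== SOURCE A (Python) =====
-- def _get_trade_keywords(trade: str) -> list[str]:
--     keyword_map: dict[str, list[str]] = {
--         "Plumbing": [
--             "PIPE",
--             "DRAIN",
--             "WATER",
--             "SEWER",
--             "WSFU",
--             "PLUMB",
--             "LAVATORY",
--             "TOILET",
--             "SHOWER",
--             "TUB",
--             "VALVE",
--             "SANITARY",
--         ],
--         "Electrical": [
--             "ELECTRICAL",
--             "OUTLET",
--             "BREAKER",
--             "PANEL",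
--             "AMP",
--             "GFCI",
--             "SWITCH",
--             "CIRCUIT",
--             "WIRING",
--             "CONDUIT",
--             "FIXTURE",
--             "VOLT",
--         ],
--         "HVAC": [
--             "HVAC",
--             "DUCT",
--             "AIR",
--             "HEATING",
--             "COOLING",
--             "CFM",
--             "BTU",
--             "SEER",
--             "COMPRESSOR",
--             "VENT",
--             "EXHAUST",
--         ],
--         "Structural": [
--             "STRUCTURAL",
--             "BEAM",
--             "COLUMN",
--             "STEEL",
--             "FRAMING",
--             "LOAD",
--             "HEADER",
--             "JOIST",
--             "RAFTER",
--             "SHEAR",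
--             "FOUNDATION",
--         ],
--     }
--
--     canonical = trade.strip().upper()
--     for key, values in keyword_map.items():
--         if key.upper() == canonical:
--             return values
--     for key, values in keyword_map.items():
--         if key.upper() in canonical or canonical in key.upper():
--             return values
--     return [canonical[:8]]
-- ===== SOURCE B (Python) =====
-- def _get_trade_keywords(trade: str) -> list[str]:
--     keyword_map: dict[str, list[str]] = {
--         "Plumbing": [
--             "PIPE", "DRAIN", "WATER", "SEWER", "WSFU", "PLUMB", "LAVATORY",
--             "TOILET", "SHOWER", "TUB", "VALVE", "SANITARY",
--         ],
--         "Electrical": [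
--             "ELECTRICAL", "OUTLET", "BREAKER", "PANEL", "AMP", "GFCI",
--             "SWITCH", "CIRCUIT", "WIRING", "CONDUIT", "FIXTURE", "VOLT",
--         ],
--         "HVAC": [
--             "HVAC", "DUCT", "AIR", "HEATING", "COOLING", "CFM", "BTU",
--             "SEER", "COMPRESSOR", "VENT", "EXHAUST",
--         ],
--         "Structural": [
--             "STRUCTURAL", "BEAM", "COLUMN", "STEEL", "FRAMING", "LOAD",
--             "HEADER", "JOIST", "RAFTER", "SHEAR", "FOUNDATION",
--         ],
--     }
--
--     canonical = trade.strip().upper()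
--     fallback = None
--     for key, values in keyword_map.items():
--         key_u = key.upper()
--         if key_u == canonical:
--             return values
--         if fallback is None and (key_u in canonical or canonical in key_u):
--             fallback = values
--     return fallback if fallback is not None else [canonical[:8]]
-- ===== Notes on version B (the rewrite author's own statement) =====
-- stated objective: simpler
-- what changed: Replaces A's two sequential loops over the keyword map (exact pass, then substring pass) by a single pass that returns immediately on an exact match and records the first substring match in a fallback variable.
import Mathlib
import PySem

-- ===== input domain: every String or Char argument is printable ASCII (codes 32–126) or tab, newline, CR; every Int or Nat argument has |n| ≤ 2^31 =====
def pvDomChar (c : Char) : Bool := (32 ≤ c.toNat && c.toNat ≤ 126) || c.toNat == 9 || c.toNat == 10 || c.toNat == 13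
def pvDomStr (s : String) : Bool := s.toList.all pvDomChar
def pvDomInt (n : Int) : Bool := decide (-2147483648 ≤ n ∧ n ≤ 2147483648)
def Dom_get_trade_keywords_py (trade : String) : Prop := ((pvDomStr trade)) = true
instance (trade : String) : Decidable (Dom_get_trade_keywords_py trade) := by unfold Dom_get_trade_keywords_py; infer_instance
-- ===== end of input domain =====

-- B replaces A's two sequential loops over the keyword map by one single pass with a
-- `fallback` variable (objective: simpler/alternative single traversal, same result).

-- the keyword_map literal shared by both Pythons (built as in the source, a dict literal)
def pvKeywordMap : PySem.Dict String (List String) :=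
  PySem.Dict.ofList [
    ("Plumbing", ["PIPE", "DRAIN", "WATER", "SEWER", "WSFU", "PLUMB", "LAVATORY",
                  "TOILET", "SHOWER", "TUB", "VALVE", "SANITARY"]),
    ("Electrical", ["ELECTRICAL", "OUTLET", "BREAKER", "PANEL", "AMP", "GFCI",
                    "SWITCH", "CIRCUIT", "WIRING", "CONDUIT", "FIXTURE", "VOLT"]),
    ("HVAC", ["HVAC", "DUCT", "AIR", "HEATING", "COOLING", "CFM", "BTU",
              "SEER", "COMPRESSOR", "VENT", "EXHAUST"]),
    ("Structural", ["STRUCTURAL", "BEAM", "COLUMN", "STEEL", "FRAMING", "LOAD",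
                    "HEADER", "JOIST", "RAFTER", "SHEAR", "FOUNDATION"])]

-- ===== PORT A =====
-- first loop of A: 'for key, values in keyword_map.items(): if key.upper() == canonical: return values'
def pvLoopExact : List (String × List String) → String → Option (List String)
  | [], _ => none
  | (k, v) :: rest, c => if PySem.Str.upper k == c then some v else pvLoopExact rest c

-- second loop of A: 'if key.upper() in canonical or canonical in key.upper(): return values'
def pvLoopSub : List (String × List String) → String → Option (List String)
  | [], _ => none
  | (k, v) :: rest, c =>
      if PySem.Str.isIn (PySem.Str.upper k) c || PySem.Str.isIn c (PySem.Str.upper k)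
      then some v else pvLoopSub rest c

def get_trade_keywords_py (trade : String) : List String :=
  let canonical := PySem.Str.upper (PySem.Str.strip trade)
  match pvLoopExact pvKeywordMap.items canonical with
  | some v => v
  | none =>
      match pvLoopSub pvKeywordMap.items canonical with
      | some v => v
      | none => [PySem.Str.slice canonical none (some 8)]

-- ===== PORT B =====
-- B's single loop, carrying the 'fallback' variable; after the loop:
-- 'return fallback if fallback is not None else [canonical[:8]]'
def pvLoopB : List (String × List String) → String → Option (List String) → List String
  | [], c, fb => fb.getD [PySem.Str.slice c none (some 8)]
  | (k, v) :: rest, c, fb =>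
      let ku := PySem.Str.upper k
      if ku == c then v
      else pvLoopB rest c
        (if fb.isNone && (PySem.Str.isIn ku c || PySem.Str.isIn c ku) then some v else fb)

def get_trade_keywords_py_alt (trade : String) : List String :=
  let canonical := PySem.Str.upper (PySem.Str.strip trade)
  pvLoopB pvKeywordMap.items canonical none

-- ===== PRECONDITION & SPEC =====
def Spec_get_trade_keywords_py (trade : String) (out : List String) : Prop := out = get_trade_keywords_py_alt trade
instance (trade : String) (out : List String) : Decidable (Spec_get_trade_keywords_py trade out) := by unfold Spec_get_trade_keywords_py; infer_instance

-- ===== CLAIM (what is proved, stated in full; the proofs are below) =====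
def Claim_equal_get_trade_keywords_py : Prop := ∀ (trade : String), Dom_get_trade_keywords_py trade → Spec_get_trade_keywords_py trade (get_trade_keywords_py trade)

-- ===== LEMMAS AND PROOFS =====

-- B's single pass computes A's two-pass result, for ANY item list and any fallback state.
theorem pvLoopB_eq (kvs : List (String × List String)) (c : String)
    (fb : Option (List String)) :
    pvLoopB kvs c fb =
      match pvLoopExact kvs c with
      | some v => v
      | none =>
          match fb with
          | some w => w
          | none =>
              match pvLoopSub kvs c with
              | some v => v
              | none => [PySem.Str.slice c none (some 8)] := by
  induction kvs generalizing fb with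
  | nil =>
      cases fb <;> simp [pvLoopB, pvLoopExact, pvLoopSub, Option.getD]
  | cons kv rest ih =>
      obtain ⟨k, v⟩ := kv
      by_cases hx : (PySem.Str.upper k == c) = true
      · simp [pvLoopB, pvLoopExact, hx]
      · rw [Bool.not_eq_true] at hx
        cases fb with
        | some w =>
            simp only [pvLoopB, pvLoopExact, hx, Bool.false_eq_true,
              if_false, Option.isNone_some, Bool.false_and, ih]
        | none =>
            by_cases hs : (PySem.Str.isIn (PySem.Str.upper k) c
                || PySem.Str.isIn c (PySem.Str.upper k)) = true
            · simp only [pvLoopB, pvLoopExact, pvLoopSub, hx, hs, Bool.false_eq_true,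
                if_false, Option.isNone_none, Bool.true_and, if_true, ih]
            · rw [Bool.not_eq_true] at hs
              simp only [pvLoopB, pvLoopExact, pvLoopSub, hx, hs, Bool.false_eq_true,
                if_false, Option.isNone_none, Bool.true_and, ih]

-- ===== VERDICT (by name: the statement is the Claim_ definition above) =====
theorem get_trade_keywords_py_spec : Claim_equal_get_trade_keywords_py := by
  intro trade _
  unfold Spec_get_trade_keywords_py get_trade_keywords_py get_trade_keywords_py_alt
  rw [pvLoopB_eq]
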